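-- pv_equiv track=rewrite | github.com/umadorna1234567/Auto-offset-updater-for-any-game | ida_pattern_bridge.py | looks_like_signature
-- ===== SOURCE A (Python) =====
-- def normalize_signature(value):
--     return " ".join(str(value).strip().split()).upper()
--
-- def tokenize_signature(signature):
--     return [token for token in normalize_signature(signature).split() if token]
--
-- def looks_like_signature(signature):
--     tokens = tokenize_signature(signature)
--     if len(tokens) < 3:
--         return False
--     for token in tokens:
--         if token in {"?", "??"}:
--             continue
--         if len(token) != 2:
--             return False
--         try:
--             int(token, 16)
--         except ValueError:
--             return False
--     return True
-- ===== SOURCE B (Python) =====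
-- # One left-to-right pass over the characters: tokens are cut and validated on the
-- # fly with a running count, instead of A's strip/split/join/upper/re-split/filter
-- # normalization pipeline followed by a separate validation loop.
-- _WS = " \t\n\r\f\v"
--
--
-- def looks_like_signature(signature):
--     text = str(signature)
--     count = 0
--     buf = ""
--     for c in text + " ":  # trailing sentinel space flushes the last token
--         if c in _WS:
--             if buf:
--                 tok = buf.upper()
--                 if tok not in ("?", "??"):
--                     if len(tok) != 2:
--                         return False
--                     try:
--                         int(tok, 16)
--                     except ValueError:
--                         return False
--                 count += 1
--                 buf = ""
--         else:
--             buf += c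
--     return count >= 3
-- ===== Notes on version B (the rewrite author's own statement) =====
-- stated objective: alternative
-- what changed: B replaces A's normalize-then-tokenize pipeline (strip, split, ' '.join, upper, re-split, filter) and separate validation loop with a single left-to-right pass over the characters that cuts tokens into a buffer, uppercases and validates each token as it is flushed, and keeps a running count.
import Mathlib
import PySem

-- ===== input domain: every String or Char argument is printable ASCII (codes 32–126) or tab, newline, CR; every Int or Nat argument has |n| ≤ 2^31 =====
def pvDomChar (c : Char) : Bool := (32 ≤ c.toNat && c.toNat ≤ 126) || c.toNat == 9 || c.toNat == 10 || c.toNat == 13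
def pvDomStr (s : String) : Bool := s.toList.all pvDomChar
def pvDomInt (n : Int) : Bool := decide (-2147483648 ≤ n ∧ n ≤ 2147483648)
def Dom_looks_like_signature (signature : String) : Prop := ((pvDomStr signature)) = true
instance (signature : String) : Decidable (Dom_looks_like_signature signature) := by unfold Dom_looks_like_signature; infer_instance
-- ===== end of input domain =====

-- B validates in ONE left-to-right character pass (tokens cut, uppercased and checked on
-- the fly with a running count) instead of A's strip/split/join/upper/re-split/filter
-- normalization pipeline followed by a separate validation loop over the token list.

-- ===== PORT A =====
def normalize_signature (value : String) : String :=
  PySem.Str.upper (PySem.Str.join " " (PySem.Str.split₀ (PySem.Str.strip value)))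

def tokenize_signature (signature : String) : List String :=
  (PySem.Str.split₀ (normalize_signature signature)).filter (fun token => token != "")

-- the for-loop over tokens (continue / early return False)
def looksLoopA : List String → Bool
  | [] => true
  | token :: rest =>
    if token = "?" ∨ token = "??" then looksLoopA rest
    else if PySem.Str.len token ≠ 2 then false
    else
      match PySem.Int.ofStrBase? token 16 with
      | some _ => looksLoopA rest
      | none => false

def looks_like_signature (signature : String) : Bool :=
  let tokens := tokenize_signature signature
  if PySem.List.len tokens < 3 then false
  else looksLoopA tokens

-- ===== PORT B =====
def bWS : List Char := [' ', '\t', '\n', '\r', Char.ofNat 12, Char.ofNat 11]   -- _WS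
def bIsWS (c : Char) : Bool := decide (c ∈ bWS)                                -- c in _WS

-- the for-loop over text + " ": buf collects the current token, count the flushed ones
def bLoop : List Char → List Char → Int → Bool
  | [], _buf, count => decide (3 ≤ count)
  | c :: rest, buf, count =>
    if bIsWS c then
      if buf ≠ [] then
        let tok := PySem.Chars.upper buf
        if ¬ (tok = ['?'] ∨ tok = ['?', '?']) then
          if tok.length ≠ 2 then false
          else
            match PySem.Int.ofCharsBase? tok 16 with
            | some _ => bLoop rest [] (count + 1)
            | none => false
        else bLoop rest [] (count + 1)
      else bLoop rest buf count
    else bLoop rest (buf ++ [c]) count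

def looks_like_signature_alt (signature : String) : Bool :=
  bLoop (signature.toList ++ [' ']) [] 0

-- ===== PRECONDITION & SPEC =====
def Spec_looks_like_signature (signature : String) (out : Bool) : Prop := out = looks_like_signature_alt signature
instance (signature : String) (out : Bool) : Decidable (Spec_looks_like_signature signature out) := by unfold Spec_looks_like_signature; infer_instance

-- ===== CLAIM (what is proved, stated in full; the proofs are below) =====
def Claim_equal_looks_like_signature : Prop := ∀ (signature : String), Dom_looks_like_signature signature → Spec_looks_like_signature signature (looks_like_signature signature)

-- ===== LEMMAS AND PROOFS =====

-- reference word splitter: pvWrec cs cur = words of cur.reverse ++ cs (cur = current word, reversed)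
def pvWrec : List Char → List Char → List (List Char)
  | [], cur => if cur = [] then [] else [cur.reverse]
  | c :: rest, cur =>
    if PySem.Chars.isspace c then
      if cur = [] then pvWrec rest [] else cur.reverse :: pvWrec rest []
    else pvWrec rest (c :: cur)

-- A's per-token test, moved to List Char
def aCheckL (t : List Char) : Bool :=
  if t = ['?'] ∨ t = ['?', '?'] then true
  else if t.length ≠ 2 then false
  else (PySem.Int.ofCharsBase? t 16).isSome

-- what B's loop does to a finished word list
def pvChk : List (List Char) → Int → Bool
  | [], count => decide (3 ≤ count)
  | w :: ws, count => if aCheckL (PySem.Chars.upper w) then pvChk ws (count + 1) else false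

-- ---- char-code transfer helpers ----
lemma pvCharCode_lt (c : Char) (h : pvDomChar c = true) : c.toNat < 128 := by
  unfold pvDomChar at h
  simp only [Bool.or_eq_true, Bool.and_eq_true, decide_eq_true_eq, beq_iff_eq] at h
  omega

lemma pvByCode {P : Char → Prop} [DecidablePred P]
    (h : ∀ n : Nat, n < 128 → P (Char.ofNat n)) (c : Char) (hc : c.toNat < 128) : P c := by
  have := h c.toNat hc
  rwa [Char.ofNat_toNat] at this

lemma isspace_eq_bIsWS (c : Char) (hd : pvDomChar c = true) :
    PySem.Chars.isspace c = bIsWS c := by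
  refine pvByCode (P := fun c => pvDomChar c = true → PySem.Chars.isspace c = bIsWS c)
    ?_ c (pvCharCode_lt c hd) hd
  decide

lemma isspace_upperChar (c : Char) (hc : c.toNat < 128) :
    PySem.Chars.isspace (PySem.Chars.upperChar c) = PySem.Chars.isspace c := by
  refine pvByCode (P := fun c => PySem.Chars.isspace (PySem.Chars.upperChar c) = PySem.Chars.isspace c)
    ?_ c hc
  decide

-- ---- split₀ = pvWrec ----
lemma go_eq (cs : List Char) : ∀ cur acc,
    PySem.Chars.split₀.go cs cur acc = acc.reverse ++ pvWrec cs cur := by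
  induction cs with
  | nil =>
    intro cur acc
    simp only [PySem.Chars.split₀.go, pvWrec]
    by_cases h : cur = [] <;> simp [h]
  | cons c rest ih =>
    intro cur acc
    simp only [PySem.Chars.split₀.go, pvWrec]
    by_cases hs : PySem.Chars.isspace c = true <;> by_cases h : cur = [] <;>
      simp [hs, h, ih]

lemma split₀_eq (cs : List Char) : PySem.Chars.split₀ cs = pvWrec cs [] := by
  simp [PySem.Chars.split₀, go_eq]

-- ---- pvWrec facts ----
lemma pvWrec_nospace_prefix : ∀ (w : List Char), (∀ c ∈ w, PySem.Chars.isspace c = false) →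
    ∀ rest cur, pvWrec (w ++ rest) cur = pvWrec rest (w.reverse ++ cur) := by
  intro w
  induction w with
  | nil => intro _ rest cur; simp
  | cons c w ih =>
    intro h rest cur
    have hc : PySem.Chars.isspace c = false := h c (by simp)
    simp only [List.cons_append, pvWrec, hc, Bool.false_eq_true, if_false]
    rw [ih (fun d hd => h d (by simp [hd])) rest (c :: cur)]
    simp

lemma pvWrec_all_space : ∀ (t : List Char), (∀ c ∈ t, PySem.Chars.isspace c = true) →
    ∀ cur, pvWrec t cur = if cur = [] then [] else [cur.reverse] := by
  intro t
  induction t with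
  | nil => intro _ cur; simp [pvWrec]
  | cons c t ih =>
    intro h cur
    have hc := h c (by simp)
    have iht := ih (fun d hd => h d (by simp [hd]))
    by_cases hcur : cur = [] <;> simp [pvWrec, hc, hcur, iht]

lemma pvWrec_space_tail : ∀ (x t : List Char), (∀ c ∈ t, PySem.Chars.isspace c = true) →
    ∀ cur, pvWrec (x ++ t) cur = pvWrec x cur := by
  intro x t ht
  induction x with
  | nil => intro cur; simp only [List.nil_append]; rw [pvWrec_all_space t ht cur]; simp [pvWrec]
  | cons c x ih =>
    intro cur
    by_cases hs : PySem.Chars.isspace c = true <;> by_cases h : cur = [] <;>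
      simp [pvWrec, hs, h, ih]

lemma pvWrec_dropWhile (cs : List Char) :
    pvWrec (List.dropWhile PySem.Chars.isspace cs) [] = pvWrec cs [] := by
  induction cs with
  | nil => rfl
  | cons c cs ih =>
    by_cases hs : PySem.Chars.isspace c = true <;>
      simp [hs, pvWrec, ih]

lemma strip_words (cs : List Char) : pvWrec (PySem.Chars.strip cs) [] = pvWrec cs [] := by
  unfold PySem.Chars.strip PySem.Chars.rstrip PySem.Chars.lstrip
  set y := List.dropWhile PySem.Chars.isspace cs with hy
  have hdecomp : y = (List.dropWhile PySem.Chars.isspace y.reverse).reverse ++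
      (List.takeWhile PySem.Chars.isspace y.reverse).reverse := by
    rw [← List.reverse_append, List.takeWhile_append_dropWhile, List.reverse_reverse]
  calc pvWrec (List.dropWhile PySem.Chars.isspace y.reverse).reverse []
      = pvWrec ((List.dropWhile PySem.Chars.isspace y.reverse).reverse ++
          (List.takeWhile PySem.Chars.isspace y.reverse).reverse) [] := by
        rw [pvWrec_space_tail]
        intro c hc
        exact List.mem_takeWhile_imp (List.mem_reverse.mp hc)
    _ = pvWrec y [] := by rw [← hdecomp]
    _ = pvWrec cs [] := by rw [hy, pvWrec_dropWhile]

lemma words_sound : ∀ (cs cur : List Char),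
    (∀ c ∈ cs, pvDomChar c = true) →
    (∀ c ∈ cur, pvDomChar c = true ∧ PySem.Chars.isspace c = false) →
    ∀ w ∈ pvWrec cs cur, w ≠ [] ∧ ∀ c ∈ w, pvDomChar c = true ∧ PySem.Chars.isspace c = false := by
  intro cs
  induction cs with
  | nil =>
    intro cur _ hcur w hw
    by_cases h : cur = []
    · simp [pvWrec, h] at hw
    · simp only [pvWrec, h, if_false] at hw
      simp only [List.mem_singleton] at hw
      subst hw
      exact ⟨by simpa using h, fun c hc => hcur c (List.mem_reverse.mp hc)⟩
  | cons c cs ih =>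
    intro cur hcs hcur w hw
    have hcd : pvDomChar c = true := hcs c (by simp)
    have hcs' : ∀ d ∈ cs, pvDomChar d = true := fun d hd => hcs d (by simp [hd])
    by_cases hs : PySem.Chars.isspace c = true
    · by_cases h : cur = []
      · simp only [pvWrec, hs, h, if_true] at hw
        exact ih [] hcs' (by simp) w hw
      · simp only [pvWrec, hs, h, if_true, if_false] at hw
        rcases List.mem_cons.mp hw with h1 | h1
        · subst h1
          exact ⟨by simpa using h, fun d hd => hcur d (List.mem_reverse.mp hd)⟩
        · exact ih [] hcs' (by simp) w h1
    · simp only [pvWrec, hs] at hw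
      refine ih (c :: cur) hcs' ?_ w hw
      intro d hd
      rcases List.mem_cons.mp hd with h1 | h1
      · subst h1; exact ⟨hcd, by simpa using hs⟩
      · exact hcur d h1

lemma upper_join (ws : List (List Char)) :
    PySem.Chars.upper (PySem.Chars.join [' '] ws) =
      PySem.Chars.join [' '] (ws.map PySem.Chars.upper) := by
  unfold PySem.Chars.join PySem.Chars.upper
  induction ws with
  | nil => simp [List.intercalate, List.intersperse]
  | cons w ws ih =>
    cases ws with
    | nil => simp [List.intercalate, List.intersperse]
    | cons w' ws' =>
      simp only [List.intercalate, List.intersperse, List.flatten_cons, List.map_cons] at *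
      simp only [List.map_append, ih]
      simp [PySem.Chars.upperChar, PySem.Chars.islower]

lemma intercalate_words : ∀ (ws : List (List Char)),
    (∀ w ∈ ws, w ≠ [] ∧ ∀ c ∈ w, PySem.Chars.isspace c = false) →
    pvWrec (List.intercalate [' '] ws) [] = ws := by
  intro ws
  induction ws with
  | nil => intro _; simp [List.intercalate, List.intersperse, pvWrec]
  | cons w ws ih =>
    intro h
    obtain ⟨hwne, hwns⟩ := h w (by simp)
    cases ws with
    | nil =>
      have hstep : List.intercalate [' '] [w] = w := by
        simp [List.intercalate, List.intersperse]
      rw [hstep]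
      have := pvWrec_nospace_prefix w hwns [] []
      simp only [List.append_nil] at this
      rw [this]
      have hwrne : w.reverse ≠ [] := by simpa using hwne
      simp [pvWrec, hwrne]
    | cons w' ws' =>
      have hstep : List.intercalate [' '] (w :: w' :: ws') =
          w ++ ' ' :: List.intercalate [' '] (w' :: ws') := by
        simp [List.intercalate, List.intersperse]
      rw [hstep, pvWrec_nospace_prefix w hwns]
      have hsp : PySem.Chars.isspace ' ' = true := by decide
      simp only [pvWrec, hsp, if_true, List.append_nil]
      have hwrne : w.reverse ≠ [] := by simpa using hwne
      simp only [hwrne, if_false, List.reverse_reverse]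
      rw [ih (fun u hu => h u (by simp [hu]))]

-- ---- A characterised ----
lemma toList_q : ("?" : String).toList = ['?'] := by decide

lemma toList_qq : ("??" : String).toList = ['?', '?'] := by decide

lemma str_eq_iff_toList (t u : String) : t = u ↔ t.toList = u.toList := by
  constructor
  · intro h; rw [h]
  · intro h; exact String.toList_inj.mp h

lemma toList_empty' : ("" : String).toList = [] := by decide

lemma map_toList_filter (l : List String) :
    (l.filter (fun t => t != "")).map String.toList =
      (l.map String.toList).filter (fun t => !t.isEmpty) := by
  induction l with
  | nil => rfl
  | cons t l ih =>
    have hpt : (t != "") = !(t.toList.isEmpty) := by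
      by_cases h : t = ""
      · subst h; decide
      · have ht : t.toList ≠ [] := by
          intro hnil
          exact h ((str_eq_iff_toList t "").mpr (by rw [hnil, toList_empty']))
        have h1 : (t != "") = true := by simpa using h
        have h2 : (!(t.toList.isEmpty)) = true := by simpa [List.isEmpty_iff] using ht
        rw [h1, h2]
    simp only [List.filter_cons, List.map_cons, hpt]
    by_cases hb : (!(t.toList.isEmpty)) = true
    · simp [hb, ih]
    · simp only [hb, Bool.false_eq_true, if_false, ih]

lemma tokenize_toList (s : String) (hd : ∀ c ∈ s.toList, pvDomChar c = true) :
    (tokenize_signature s).map String.toList = (pvWrec s.toList []).map PySem.Chars.upper := by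
  have hwords := words_sound s.toList [] hd (by simp)
  have hup : ∀ w ∈ (pvWrec s.toList []).map PySem.Chars.upper,
      w ≠ [] ∧ ∀ c ∈ w, PySem.Chars.isspace c = false := by
    intro w hw
    rcases List.mem_map.mp hw with ⟨u, hu, rfl⟩
    obtain ⟨hune, hu2⟩ := hwords u hu
    refine ⟨by simpa [PySem.Chars.upper] using hune, ?_⟩
    intro c hc
    rcases List.mem_map.mp (by simpa [PySem.Chars.upper] using hc) with ⟨d, hd2, rfl⟩
    obtain ⟨hdd, hds⟩ := hu2 d hd2
    rw [isspace_upperChar d (pvCharCode_lt d hdd)]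
    exact hds
  unfold tokenize_signature normalize_signature
  rw [map_toList_filter, PySem.Str.split₀_map_toList, PySem.Str.toList_upper,
    PySem.Str.toList_join, PySem.Str.split₀_map_toList, PySem.Str.toList_strip]
  have hsep : (" " : String).toList = [' '] := by decide
  rw [hsep]
  simp only [split₀_eq]
  rw [strip_words, upper_join]
  have hjoin : PySem.Chars.join [' '] ((pvWrec s.toList []).map PySem.Chars.upper) =
      List.intercalate [' '] ((pvWrec s.toList []).map PySem.Chars.upper) := rfl
  rw [hjoin, intercalate_words _ hup]
  refine List.filter_eq_self.mpr ?_
  intro w hw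
  have := (hup w hw).1
  simpa [List.isEmpty_eq_false_iff] using this

lemma ofStrBase?_toList (t : String) (b : Int) :
    PySem.Int.ofStrBase? t b = PySem.Int.ofCharsBase? t.toList b := by
  rw [← PySem.Int.ofStrBase?_ofList]; simp

lemma strLen_ne_two (t : String) : (PySem.Str.len t ≠ 2) ↔ (t.toList.length ≠ 2) := by
  rw [PySem.Str.len_eq]; omega

lemma looksLoopA_eq (ts : List String) :
    looksLoopA ts = ts.all (fun t => aCheckL t.toList) := by
  induction ts with
  | nil => rfl
  | cons t ts ih =>
    have hmem : (t = "?" ∨ t = "??") ↔ (t.toList = ['?'] ∨ t.toList = ['?', '?']) := by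
      rw [str_eq_iff_toList t "?", str_eq_iff_toList t "??", toList_q, toList_qq]
    simp only [looksLoopA, List.all_cons]
    by_cases hm : t = "?" ∨ t = "??"
    · rw [if_pos hm, ih]
      have : aCheckL t.toList = true := by
        unfold aCheckL; rw [if_pos (hmem.mp hm)]
      rw [this, Bool.true_and]
    · rw [if_neg hm]
      have hm' : ¬ (t.toList = ['?'] ∨ t.toList = ['?', '?']) := fun h => hm (hmem.mpr h)
      by_cases hl : PySem.Str.len t ≠ 2
      · rw [if_pos hl]
        have : aCheckL t.toList = false := by
          unfold aCheckL
          rw [if_neg hm', if_pos ((strLen_ne_two t).mp hl)]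
        rw [this, Bool.false_and]
      · rw [if_neg hl, ofStrBase?_toList]
        have hl' : ¬ (t.toList.length ≠ 2) := fun h => hl ((strLen_ne_two t).mpr h)
        have hA : aCheckL t.toList = (PySem.Int.ofCharsBase? t.toList 16).isSome := by
          unfold aCheckL
          rw [if_neg hm', if_neg hl']
        cases hp : PySem.Int.ofCharsBase? t.toList 16 with
        | none => simp [hA, hp]
        | some v => simp [hA, hp, ih]

lemma pvChk_eq : ∀ (ws : List (List Char)) (count : Int),
    pvChk ws count =
      (ws.all (fun w => aCheckL (PySem.Chars.upper w)) && decide (3 ≤ count + (ws.length : Int))) := by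
  intro ws
  induction ws with
  | nil => intro count; simp [pvChk]
  | cons w ws ih =>
    intro count
    simp only [pvChk, List.all_cons, List.length_cons]
    by_cases hv : aCheckL (PySem.Chars.upper w) = true
    · rw [if_pos hv, ih, hv]
      have : (3 ≤ count + 1 + (ws.length : Int)) ↔ (3 ≤ count + ((ws.length : Nat) + 1 : Nat)) := by
        push_cast; omega
      simp [this]
    · simp [hv]

lemma A_char (s : String) (hd : ∀ c ∈ s.toList, pvDomChar c = true) :
    looks_like_signature s = pvChk (pvWrec s.toList []) 0 := by
  have htok := tokenize_toList s hd
  have hlen : (tokenize_signature s).length = (pvWrec s.toList []).length := by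
    have := congrArg List.length htok
    simpa using this
  have hall : looksLoopA (tokenize_signature s) =
      (pvWrec s.toList []).all (fun w => aCheckL (PySem.Chars.upper w)) := by
    rw [looksLoopA_eq]
    have h1 : (tokenize_signature s).all (fun t => aCheckL t.toList) =
        ((tokenize_signature s).map String.toList).all aCheckL := by
      rw [List.all_map]; rfl
    rw [h1, htok, List.all_map]; rfl
  unfold looks_like_signature
  rw [pvChk_eq]
  simp only [PySem.List.len_eq, hlen, hall]
  by_cases h3 : ((pvWrec s.toList []).length : Int) < 3
  · rw [if_pos h3]
    have : decide (3 ≤ (0 : Int) + ((pvWrec s.toList []).length : Int)) = false := by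
      simpa using by omega
    rw [this, Bool.and_false]
  · rw [if_neg h3]
    have : decide (3 ≤ (0 : Int) + ((pvWrec s.toList []).length : Int)) = true := by
      simpa using by omega
    rw [this, Bool.and_true]

-- ---- B characterised ----
lemma bFlush (c : Char) (hws : bIsWS c = true) (rest : List Char) (buf : List Char)
    (hbuf : buf ≠ []) (count : Int) :
    bLoop (c :: rest) buf count =
      (if aCheckL (PySem.Chars.upper buf) then bLoop rest [] (count + 1) else false) := by
  simp only [bLoop, hws, if_true]
  rw [if_pos hbuf]
  unfold aCheckL
  by_cases hm : PySem.Chars.upper buf = ['?'] ∨ PySem.Chars.upper buf = ['?', '?']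
  · rw [if_neg (not_not_intro hm), if_pos hm, if_pos rfl]
  · rw [if_pos hm, if_neg hm]
    by_cases hl : (PySem.Chars.upper buf).length ≠ 2
    · rw [if_pos hl, if_pos hl]
      simp
    · rw [if_neg hl, if_neg hl]
      cases hp : PySem.Int.ofCharsBase? (PySem.Chars.upper buf) 16 with
      | none => simp
      | some v => simp

lemma B1 : ∀ (cs cur : List Char) (count : Int),
    (∀ c ∈ cs, pvDomChar c = true) →
    bLoop (cs ++ [' ']) cur.reverse count = pvChk (pvWrec cs cur) count := by
  intro cs
  induction cs with
  | nil =>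
    intro cur count _
    simp only [List.nil_append]
    by_cases hc : cur = []
    · subst hc
      simp [bLoop, pvWrec, pvChk, bIsWS, bWS]
    · have hbuf : cur.reverse ≠ [] := by simpa using hc
      rw [bFlush ' ' (by decide) [] cur.reverse hbuf count]
      simp only [pvWrec, hc, if_false, pvChk]
      by_cases hv : aCheckL (PySem.Chars.upper cur.reverse) = true
      · rw [if_pos hv, if_pos hv]; rfl
      · rw [if_neg (by simpa using hv), if_neg (by simpa using hv)]
  | cons c rest ih =>
    intro cur count hcs
    have hcd : pvDomChar c = true := hcs c (by simp)
    have hrest : ∀ d ∈ rest, pvDomChar d = true := fun d hd => hcs d (by simp [hd])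
    have hwseq := isspace_eq_bIsWS c hcd
    by_cases hsp : PySem.Chars.isspace c = true
    · have hws : bIsWS c = true := by rw [← hwseq]; exact hsp
      by_cases hc : cur = []
      · subst hc
        simp only [List.cons_append, List.reverse_nil, bLoop, hws, if_true]
        rw [if_neg (by simp)]
        simp only [pvWrec, hsp, if_true]
        exact ih [] count hrest
      · have hbuf : cur.reverse ≠ [] := by simpa using hc
        simp only [List.cons_append]
        rw [bFlush c hws (rest ++ [' ']) cur.reverse hbuf count]
        simp only [pvWrec, hsp, if_true, hc, if_false, pvChk]
        by_cases hv : aCheckL (PySem.Chars.upper cur.reverse) = true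
        · rw [if_pos hv, if_pos hv]
          have := ih [] (count + 1) hrest
          simpa using this
        · rw [if_neg (by simpa using hv), if_neg (by simpa using hv)]
    · have hws : bIsWS c = false := by rw [← hwseq]; simpa using hsp
      simp only [List.cons_append, bLoop, hws, Bool.false_eq_true, if_false]
      have hrev : cur.reverse ++ [c] = (c :: cur).reverse := by simp
      rw [hrev]
      simp only [pvWrec, hsp, Bool.false_eq_true, if_false]
      exact ih (c :: cur) count hrest

-- ===== VERDICT (by name: the statement is the Claim_ definition above) =====
theorem looks_like_signature_spec : Claim_equal_looks_like_signature := by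
  intro s hdom
  unfold Spec_looks_like_signature
  have hd : ∀ c ∈ s.toList, pvDomChar c = true := by
    have := hdom
    unfold Dom_looks_like_signature pvDomStr at this
    simpa [List.all_eq_true] using this
  have hB := B1 s.toList [] 0 hd
  simp only [List.reverse_nil] at hB
  rw [A_char s hd]
  unfold looks_like_signature_alt
  rw [hB]
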